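-- pv_equiv track=rewrite | github.com/eunomia-bpf/ebpf-verifier-agent | case_study/capture_kernel_selftests_verifier_logs.py | normalized_compile_failure
-- ===== SOURCE A (Python) =====
-- def normalized_compile_failure(stderr: str) -> str:
--     for line in stderr.splitlines():
--         stripped = line.strip()
--         if "fatal error:" in stripped:
--             return stripped.split("fatal error:", 1)[1].strip()
--     for line in stderr.splitlines():
--         stripped = line.strip()
--         if ": error:" in stripped:
--             return stripped.split(": error:", 1)[1].strip()
--     return next((line.strip() for line in stderr.splitlines() if line.strip()), "unknown compile error")
-- ===== SOURCE B (Python) =====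
-- def normalized_compile_failure(stderr: str) -> str:
--     err = None
--     first = None
--     for line in stderr.splitlines():
--         s = line.strip()
--         if "fatal error:" in s:
--             return s.split("fatal error:", 1)[1].strip()
--         if err is None and ": error:" in s:
--             err = s.split(": error:", 1)[1].strip()
--         if first is None and s:
--             first = s
--     if err is not None:
--         return err
--     if first is not None:
--         return first
--     return "unknown compile error"
-- ===== Notes on version B (the rewrite author's own statement) =====
-- stated objective: alternative
-- what changed: Replaces A's three separate scans of stderr.splitlines() (fatal pass, error pass, first-non-empty pass) with a single traversal that maintains error/first-non-empty candidates and returns early on a fatal line.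
import Mathlib
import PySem

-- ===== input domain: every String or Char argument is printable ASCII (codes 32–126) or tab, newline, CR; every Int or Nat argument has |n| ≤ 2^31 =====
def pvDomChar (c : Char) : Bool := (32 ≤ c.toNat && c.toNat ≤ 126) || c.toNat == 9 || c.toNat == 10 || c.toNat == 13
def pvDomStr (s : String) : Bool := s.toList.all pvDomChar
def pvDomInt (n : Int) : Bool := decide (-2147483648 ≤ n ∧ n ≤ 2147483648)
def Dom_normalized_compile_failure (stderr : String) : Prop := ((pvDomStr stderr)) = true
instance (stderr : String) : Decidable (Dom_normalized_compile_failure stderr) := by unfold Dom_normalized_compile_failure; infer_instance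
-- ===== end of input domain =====

-- ===== PORT A =====
-- s.split(sep, 1)[1].strip() — the suffix after the first occurrence of sep, stripped.
-- Exact where sep occurs in s (both ports only apply it under an 'isIn sep s' guard).
def nscfSuffixAfter (s sep : String) : String :=
  PySem.Str.strip (((PySem.Str.splitMax? s sep 1).getD []).getD 1 "")

-- first loop of A: first stripped line containing "fatal error:" → its suffix
def nscfLoop1 : List String → Option String
  | [] => none
  | l :: rest =>
      let s := PySem.Str.strip l
      if PySem.Str.isIn "fatal error:" s then some (nscfSuffixAfter s "fatal error:")
      else nscfLoop1 rest

-- second loop of A: first stripped line containing ": error:" → its suffix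
def nscfLoop2 : List String → Option String
  | [] => none
  | l :: rest =>
      let s := PySem.Str.strip l
      if PySem.Str.isIn ": error:" s then some (nscfSuffixAfter s ": error:")
      else nscfLoop2 rest

-- third scan of A: first non-empty stripped line
def nscfLoop3 : List String → Option String
  | [] => none
  | l :: rest =>
      let s := PySem.Str.strip l
      if s ≠ "" then some s else nscfLoop3 rest

def normalized_compile_failure (stderr : String) : String :=
  let lines := PySem.Str.splitlines stderr
  match nscfLoop1 lines with
  | some r => r
  | none =>
    match nscfLoop2 lines with
    | some r => r
    | none => (nscfLoop3 lines).getD "unknown compile error"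

-- ===== PORT B =====
-- B: one pass, carrying the ": error:" candidate and the first-non-empty candidate;
-- a "fatal error:" line returns immediately.
def nscfGo : List String → Option String → Option String → String
  | [], err, first =>
      match err with
      | some e => e
      | none => first.getD "unknown compile error"
  | l :: rest, err, first =>
      let s := PySem.Str.strip l
      if PySem.Str.isIn "fatal error:" s then nscfSuffixAfter s "fatal error:"
      else
        let err' := if err.isNone && PySem.Str.isIn ": error:" s
                    then some (nscfSuffixAfter s ": error:") else err
        let first' := if first.isNone && !(s == "") then some s else first
        nscfGo rest err' first'

def normalized_compile_failure_alt (stderr : String) : String :=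
  nscfGo (PySem.Str.splitlines stderr) none none

-- ===== PRECONDITION & SPEC =====
def Spec_normalized_compile_failure (stderr : String) (out : String) : Prop := out = normalized_compile_failure_alt stderr
instance (stderr : String) (out : String) : Decidable (Spec_normalized_compile_failure stderr out) := by unfold Spec_normalized_compile_failure; infer_instance

-- ===== CLAIM (what is proved, stated in full; the proofs are below) =====
def Claim_equal_normalized_compile_failure : Prop := ∀ (stderr : String), Dom_normalized_compile_failure stderr → Spec_normalized_compile_failure stderr (normalized_compile_failure stderr)

-- ===== LEMMAS AND PROOFS =====

-- Invariant of B's single pass: with candidates err/first already collected, nscfGo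
-- finishes exactly as A's three scans would on the remaining lines, with the carried
-- candidates taking precedence over what the later scans find.
theorem nscfGo_eq (lines : List String) :
    ∀ (err first : Option String),
      nscfGo lines err first =
        match nscfLoop1 lines with
        | some r => r
        | none =>
          match err.orElse (fun _ => nscfLoop2 lines) with
          | some e => e
          | none => ((first.orElse (fun _ => nscfLoop3 lines)).getD "unknown compile error") := by
  induction lines with
  | nil =>
      intro err first
      cases err <;> cases first <;> simp [nscfGo, nscfLoop1, nscfLoop2, nscfLoop3, Option.orElse]
  | cons l rest ih =>
      intro err first
      simp only [nscfGo, nscfLoop1, nscfLoop2, nscfLoop3]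
      by_cases hf : PySem.Chars.isIn ['f','a','t','a','l',' ','e','r','r','o','r',':'] (PySem.Chars.strip l.toList) = true
      · simp [hf]
      · have hfe : PySem.Chars.isIn ['f','a','t','a','l',' ','e','r','r','o','r',':'] ([] : List Char) = false := by decide
        have hee : PySem.Chars.isIn [':',' ','e','r','r','o','r',':'] ([] : List Char) = false := by decide
        by_cases he : PySem.Chars.isIn [':',' ','e','r','r','o','r',':'] (PySem.Chars.strip l.toList) = true <;>
          by_cases hs : PySem.Str.strip l = "" <;>
          cases err <;> cases first <;>
          simp [hf, he, hs, hfe, hee, ih, Option.orElse]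

-- ===== VERDICT (by name: the statement is the Claim_ definition above) =====
theorem normalized_compile_failure_spec : Claim_equal_normalized_compile_failure := by
  intro stderr _
  unfold Spec_normalized_compile_failure normalized_compile_failure normalized_compile_failure_alt
  rw [nscfGo_eq]
  simp only [Option.orElse]
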